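-- pv_equiv track=rewrite | github.com/981377660LMT/algorithm-study | 5_map/邻接表/限流模型.py | DDoSProtection
-- ===== SOURCE A (Python) =====
-- from collections import defaultdict
-- from typing import List, Tuple
--
-- def DDoSProtection(requests: List[List[int]], u: int, g: int) -> int:
--     """求成功访问的次数"""
--     if u == 0 or g == 0:
--         return 0
--     userReq = defaultdict(list)
--     allReq = []
--     for user, time in sorted(requests, key=lambda x: (x[1], x[0])):
--         isUserOk = len(userReq[user]) < u or time - userReq[user][-u] >= 60
--         isAllOk = len(allReq) < g or time - allReq[-g] >= 60
--         if isUserOk and isAllOk: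
--             userReq[user].append(time)
--             allReq.append(time)
--     return len(allReq)
-- ===== SOURCE B (Python) =====
-- def DDoSProtection(requests, u, g):
--     """求成功访问的次数 — one flat log of accepted (user, time) pairs; window counts are recomputed by scanning it."""
--     if u == 0 or g == 0:
--         return 0
--     accepted = []
--     for user, time in sorted(requests, key=lambda x: (x[1], x[0])):
--         recent = [t for _, t in accepted if t > time - 60]
--         mine = sum(1 for v, t in accepted if v == user and t > time - 60)
--         if mine < u and len(recent) < g:
--             accepted.append((user, time))
--     return len(accepted)
-- ===== Notes on version B (the rewrite author's own statement) =====
-- stated objective: simpler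
-- what changed: Drops A's per-user defaultdict of append-only lists with negative -u/-g indexing entirely: B keeps one flat chronological log of accepted (user, time) pairs and re-derives both the per-user and the global 60-second-window counts by scanning that log, accepting iff both counts are below their limits.
-- crash fix: On a nonempty list of [user, time] pairs with a negative (nonzero) u or g, A raises IndexError on the userReq[user][-u]/allReq[-g] lookup, while B's window counts are never below a negative limit, so it admits nothing and returns 0. — e.g. on DDoSProtection([[1, 1]], -1, 1): A raises IndexError, B returns 0
import Mathlib
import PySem

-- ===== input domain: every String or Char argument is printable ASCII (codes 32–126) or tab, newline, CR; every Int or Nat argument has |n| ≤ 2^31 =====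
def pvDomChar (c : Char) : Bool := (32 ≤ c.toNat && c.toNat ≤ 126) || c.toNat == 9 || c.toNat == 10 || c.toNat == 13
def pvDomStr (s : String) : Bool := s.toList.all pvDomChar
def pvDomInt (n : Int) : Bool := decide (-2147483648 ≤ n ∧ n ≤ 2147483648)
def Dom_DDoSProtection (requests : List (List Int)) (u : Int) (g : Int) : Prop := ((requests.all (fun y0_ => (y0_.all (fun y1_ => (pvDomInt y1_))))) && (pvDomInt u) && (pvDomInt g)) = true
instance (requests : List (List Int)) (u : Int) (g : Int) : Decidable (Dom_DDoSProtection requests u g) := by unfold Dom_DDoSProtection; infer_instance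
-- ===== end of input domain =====

-- B drops A's per-user dict of append-only lists with negative indexing: it keeps one flat
-- chronological log of accepted (user, time) pairs and re-derives both window counts by
-- scanning that log; objective: simpler. Equivalence is about the return value only.

-- ===== PORT A =====
-- loop body of A, kept as a helper: state = (userReq, allReq)
def pvStepA (u : Int) (g : Int) (st : PySem.Dict Int (List Int) × List Int)
    (r : List Int) : PySem.Dict Int (List Int) × List Int :=
  let user := PySem.List.pyGetD r 0 0
  let time := PySem.List.pyGetD r 1 0
  let lst := st.1.getD user []
  if (((lst.length : Int) < u ∨ 60 ≤ time - PySem.List.pyGetD lst (-u) 0) ∧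
      (((st.2.length : Int) < g) ∨ 60 ≤ time - PySem.List.pyGetD st.2 (-g) 0)) then
    (st.1.insert user (lst ++ [time]), st.2 ++ [time])
  else st

def DDoSProtection (requests : List (List Int)) (u : Int) (g : Int) : Int :=
  if u = 0 ∨ g = 0 then 0
  else
    ((((PySem.List.sorted2 requests (fun x => PySem.List.pyGetD x 1 0)
        (fun x => PySem.List.pyGetD x 0 0)).foldl (pvStepA u g)
        (PySem.Dict.empty, [])).2.length : Int))

-- ===== PORT B =====
-- B's for-loop as structural recursion over the sorted requests; `accepted` is the flat log
def pvLoopB (u : Int) (g : Int) : List (List Int) → List (Int × Int) → Int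
  | [], accepted => (accepted.length : Int)
  | r :: rest, accepted =>
    let user := PySem.List.pyGetD r 0 0
    let time := PySem.List.pyGetD r 1 0
    let recent := (accepted.filter (fun p => decide (time - 60 < p.2))).map Prod.snd
    let mine := accepted.countP (fun p => p.1 == user && decide (time - 60 < p.2))
    if (mine : Int) < u ∧ (recent.length : Int) < g then
      pvLoopB u g rest (accepted ++ [(user, time)])
    else
      pvLoopB u g rest accepted

def DDoSProtection_alt (requests : List (List Int)) (u : Int) (g : Int) : Int :=
  if u = 0 ∨ g = 0 then 0
  else
    pvLoopB u g (PySem.List.sorted2 requests (fun x => PySem.List.pyGetD x 1 0)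
      (fun x => PySem.List.pyGetD x 0 0)) []

-- ===== PRECONDITION & SPEC =====
-- Pre_ excludes exactly the inputs where the Python A raises: a nonempty request list with a
-- negative limit (IndexError on `allReq[-g]`/`userReq[user][-u]`), or a request that is not a
-- [user, time] pair (unpacking/sort-key error) when the limits are nonzero.
def Pre_DDoSProtection (requests : List (List Int)) (u : Int) (g : Int) : Prop :=
  u = 0 ∨ g = 0 ∨ requests = [] ∨ (1 ≤ u ∧ 1 ≤ g ∧ ∀ r ∈ requests, r.length = 2)
instance (requests : List (List Int)) (u : Int) (g : Int) : Decidable (Pre_DDoSProtection requests u g) := by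
  unfold Pre_DDoSProtection; infer_instance

def pvWitness_DDoSProtection : List (List Int) × Int × Int := ([[1, 10], [2, 30], [1, 50], [2, 120]], 2, 3)

-- On a nonempty list of [user, time] pairs with a negative u or g (both nonzero), A raises IndexError
-- on the `[-u]`/`[-g]` lookup while B's window counts are never below a negative limit, so it
-- admits nothing and returns 0.
def Raises_DDoSProtection (requests : List (List Int)) (u : Int) (g : Int) : Prop :=
  requests ≠ [] ∧ u ≠ 0 ∧ g ≠ 0 ∧ (u < 0 ∨ g < 0) ∧ ∀ r ∈ requests, r.length = 2
instance (requests : List (List Int)) (u : Int) (g : Int) : Decidable (Raises_DDoSProtection requests u g) := by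
  unfold Raises_DDoSProtection; infer_instance
def pvRaiseWitness_DDoSProtection : List (List Int) × Int × Int := ([[1, 1]], -1, 1)
def pvRaiseWitnessOut_DDoSProtection : Int := 0

def Spec_DDoSProtection (requests : List (List Int)) (u : Int) (g : Int) (out : Int) : Prop := out = DDoSProtection_alt requests u g
instance (requests : List (List Int)) (u : Int) (g : Int) (out : Int) : Decidable (Spec_DDoSProtection requests u g out) := by unfold Spec_DDoSProtection; infer_instance

-- ===== CLAIM (what is proved, stated in full; the proofs are below) =====
def Claim_equal_DDoSProtection : Prop := ∀ (requests : List (List Int)) (u : Int) (g : Int), Dom_DDoSProtection requests u g → Pre_DDoSProtection requests u g → Spec_DDoSProtection requests u g (DDoSProtection requests u g)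

def Claim_raises_DDoSProtection : Prop := (∀ (requests : List (List Int)) (u : Int) (g : Int), Dom_DDoSProtection requests u g → Raises_DDoSProtection requests u g → ¬ Pre_DDoSProtection requests u g) ∧ (Dom_DDoSProtection (pvRaiseWitness_DDoSProtection.1) (pvRaiseWitness_DDoSProtection.2.1) (pvRaiseWitness_DDoSProtection.2.2) ∧ Raises_DDoSProtection (pvRaiseWitness_DDoSProtection.1) (pvRaiseWitness_DDoSProtection.2.1) (pvRaiseWitness_DDoSProtection.2.2) ∧ DDoSProtection_alt (pvRaiseWitness_DDoSProtection.1) (pvRaiseWitness_DDoSProtection.2.1) (pvRaiseWitness_DDoSProtection.2.2) = pvRaiseWitnessOut_DDoSProtection)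

-- ===== LEMMAS AND PROOFS =====

-- time and user of a request, and the lexicographic order Python's sort key (x[1], x[0]) induces
def pvT (r : List Int) : Int := PySem.List.pyGetD r 1 0
def pvU (r : List Int) : Int := PySem.List.pyGetD r 0 0
def pvLe (a b : List Int) : Prop := pvT a < pvT b ∨ (pvT a = pvT b ∧ pvU a ≤ pvU b)
def pvBefore (a b : List Int) : Bool :=
  decide (pvT a < pvT b) || (!decide (pvT b < pvT a) && decide (pvU a < pvU b))

lemma pvLe_trans {a b c : List Int} (h1 : pvLe a b) (h2 : pvLe b c) : pvLe a c := by
  unfold pvLe at *; rcases h1 with h1 | ⟨h1, h1'⟩ <;> rcases h2 with h2 | ⟨h2, h2'⟩ <;> [left; left; left; right] <;> omega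

lemma pvBefore_true {a b : List Int} (h : pvBefore a b = true) : pvLe a b := by
  unfold pvBefore at h; unfold pvLe; simp at h; omega

lemma pvBefore_false {a b : List Int} (h : pvBefore a b = false) : pvLe b a := by
  unfold pvBefore at h; unfold pvLe; simp at h; omega

lemma pvInsertBy_pairwise (x : List Int) (ys : List (List Int)) (h : ys.Pairwise pvLe) :
    (PySem.List.insertBy pvBefore x ys).Pairwise pvLe := by
  induction ys with
  | nil => simp [PySem.List.insertBy]
  | cons y ys ih =>
    rw [List.pairwise_cons] at h
    by_cases hb : pvBefore x y = true
    · simp [PySem.List.insertBy, hb]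
      exact ⟨⟨pvBefore_true hb, fun z hz => pvLe_trans (pvBefore_true hb) (h.1 z hz)⟩, h⟩
    · have hb' : pvBefore x y = false := by simpa using hb
      have hins : PySem.List.insertBy pvBefore x (y :: ys) =
          y :: PySem.List.insertBy pvBefore x ys := by
        simp [PySem.List.insertBy, hb']
      rw [hins, List.pairwise_cons]
      refine ⟨fun z hz => ?_, ih h.2⟩
      rcases (PySem.List.mem_insertBy pvBefore x z ys).mp hz with rfl | hz
      · exact pvBefore_false hb'
      · exact h.1 z hz

lemma pvFoldl_insertBy_pairwise (xs acc : List (List Int)) (h : acc.Pairwise pvLe) :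
    (xs.foldl (fun acc x => PySem.List.insertBy pvBefore x acc) acc).Pairwise pvLe := by
  induction xs generalizing acc with
  | nil => exact h
  | cons x xs ih => exact ih _ (pvInsertBy_pairwise x acc h)

lemma pvSorted2_pairwise (xs : List (List Int)) :
    (PySem.List.sorted2 xs (fun x => PySem.List.pyGetD x 1 0)
      (fun x => PySem.List.pyGetD x 0 0)).Pairwise pvLe := by
  have : PySem.List.sorted2 xs (fun x => PySem.List.pyGetD x 1 0) (fun x => PySem.List.pyGetD x 0 0)
      = xs.foldl (fun acc x => PySem.List.insertBy pvBefore x acc) [] := rfl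
  rw [this]
  exact pvFoldl_insertBy_pairwise xs [] (by simp)

lemma pvFilterLen_le (l : List Int) (b : Int) (hs : l.Pairwise (· ≤ ·)) :
    ∀ (k : Nat) (hk : k < l.length), l[k] ≤ b →
      (l.filter (fun x => decide (b < x))).length + k + 1 ≤ l.length := by
  induction l with
  | nil => intro k hk; simp at hk
  | cons x l ih =>
    rw [List.pairwise_cons] at hs
    intro k hk hkb
    cases k with
    | zero =>
      simp only [List.getElem_cons_zero] at hkb
      simp [decide_eq_false (by omega : ¬ b < x)]
      have := List.length_filter_le (fun x => decide (b < x)) l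
      omega
    | succ k =>
      simp only [List.getElem_cons_succ] at hkb
      have hk' : k < l.length := by simpa using Nat.lt_of_succ_lt_succ hk
      have h2 := ih hs.2 k hk' hkb
      have hxb : ¬ b < x := by have := hs.1 l[k] (l.getElem_mem hk'); omega
      have hfe : (x :: l).filter (fun x => decide (b < x)) = l.filter (fun x => decide (b < x)) := by
        simp [decide_eq_false hxb]
      rw [hfe]
      have hlc : (x :: l).length = l.length + 1 := rfl
      omega

lemma pvFilterLen_ge (l : List Int) (b : Int) (hs : l.Pairwise (· ≤ ·)) :
    ∀ (k : Nat) (hk : k < l.length), b < l[k] →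
      l.length ≤ (l.filter (fun x => decide (b < x))).length + k := by
  induction l with
  | nil => intro k hk; simp at hk
  | cons x l ih =>
    rw [List.pairwise_cons] at hs
    intro k hk hkb
    cases k with
    | zero =>
      simp only [List.getElem_cons_zero] at hkb
      have : (x :: l).filter (fun x => decide (b < x)) = x :: l := by
        refine List.filter_eq_self.mpr (fun a ha => decide_eq_true ?_)
        rcases List.mem_cons.mp ha with rfl | ha
        · omega
        · have := hs.1 a ha; omega
      simp [this]
    | succ k =>
      simp only [List.getElem_cons_succ] at hkb
      have h2 := ih hs.2 k (by simpa using Nat.lt_of_succ_lt_succ hk) hkb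
      have : (l.filter (fun x => decide (b < x))).length ≤
          ((x :: l).filter (fun x => decide (b < x))).length := by
        by_cases hx : b < x <;> simp [hx]
      have hlc : (x :: l).length = l.length + 1 := rfl
      omega

-- A's "len < u or time - lst[-u] >= 60" test is exactly "fewer than u entries in the window"
lemma pvDecision (l : List Int) (u t : Int) (hu : 1 ≤ u) (hs : l.Pairwise (· ≤ ·)) :
    (((l.length : Int) < u ∨ 60 ≤ t - PySem.List.pyGetD l (-u) 0)) ↔
      (((l.filter (fun x => decide (t - 60 < x))).length : Int) < u) := by
  by_cases hlen : (l.length : Int) < u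
  · have : (l.filter (fun x => decide (t - 60 < x))).length ≤ l.length :=
      List.length_filter_le _ _
    constructor
    · intro _; omega
    · intro _; left; exact hlen
  · have hu' : u.toNat ≤ l.length := by omega
    have hk : l.length - u.toNat < l.length := by omega
    have hget : PySem.List.pyGetD l (-u) 0 = l[l.length - u.toNat] := by
      have h1 : (0 : Nat) < u.toNat := by omega
      have := PySem.List.pyGet?_neg_natCast (xs := l) (k := u.toNat) h1 hu'
      have hcast : (-(u.toNat : Int)) = -u := by omega
      rw [hcast] at this
      simp [PySem.List.pyGetD, this, List.getElem?_eq_getElem hk]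
    rw [hget]
    constructor
    · rintro (h | h)
      · omega
      · have hle : l[l.length - u.toNat] ≤ t - 60 := by omega
        have := pvFilterLen_le l (t - 60) hs (l.length - u.toNat) hk hle
        omega
    · intro h
      by_contra hcon
      rw [not_or, not_lt, not_le] at hcon
      have hlt : t - 60 < l[l.length - u.toNat] := by omega
      have := pvFilterLen_ge l (t - 60) hs (l.length - u.toNat) hk hlt
      omega

-- the coupling invariant between A's state (userReq, allReq) and B's flat log, at horizon T
def pvInv (T : Int) (sA : PySem.Dict Int (List Int) × List Int)
    (acc : List (Int × Int)) : Prop :=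
  acc.map Prod.snd = sA.2 ∧
  (∀ v : Int, (acc.filter (fun p => p.1 == v)).map Prod.snd = sA.1.getD v []) ∧
  sA.2.Pairwise (· ≤ ·) ∧ (∀ x ∈ sA.2, x ≤ T)

lemma pvStepA_pos (u g : Int) (sA : PySem.Dict Int (List Int) × List Int) (r : List Int)
    (h : (((sA.1.getD (PySem.List.pyGetD r 0 0) []).length : Int) < u ∨
          60 ≤ PySem.List.pyGetD r 1 0 - PySem.List.pyGetD (sA.1.getD (PySem.List.pyGetD r 0 0) []) (-u) 0) ∧
         (((sA.2.length : Int) < g) ∨ 60 ≤ PySem.List.pyGetD r 1 0 - PySem.List.pyGetD sA.2 (-g) 0)) :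
    pvStepA u g sA r = (sA.1.insert (PySem.List.pyGetD r 0 0)
      ((sA.1.getD (PySem.List.pyGetD r 0 0) []) ++ [PySem.List.pyGetD r 1 0]),
      sA.2 ++ [PySem.List.pyGetD r 1 0]) := by
  simp only [pvStepA]
  rw [if_pos h]

lemma pvStepA_neg (u g : Int) (sA : PySem.Dict Int (List Int) × List Int) (r : List Int)
    (h : ¬ ((((sA.1.getD (PySem.List.pyGetD r 0 0) []).length : Int) < u ∨
          60 ≤ PySem.List.pyGetD r 1 0 - PySem.List.pyGetD (sA.1.getD (PySem.List.pyGetD r 0 0) []) (-u) 0) ∧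
         (((sA.2.length : Int) < g) ∨ 60 ≤ PySem.List.pyGetD r 1 0 - PySem.List.pyGetD sA.2 (-g) 0))) :
    pvStepA u g sA r = sA := by
  simp only [pvStepA]
  rw [if_neg h]

-- B's two scans of the log compute exactly the window sizes of A's lists
lemma pvMine_eq (acc : List (Int × Int)) (v t : Int) :
    acc.countP (fun p => p.1 == v && decide (t - 60 < p.2))
      = (((acc.filter (fun p => p.1 == v)).map Prod.snd).filter (fun x => decide (t - 60 < x))).length := by
  induction acc with
  | nil => rfl
  | cons p l ih =>
    by_cases h1 : (p.1 == v) = true <;> by_cases h2 : t - 60 < p.2 <;>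
      simp [h1, h2, ih]

lemma pvRecent_eq (acc : List (Int × Int)) (t : Int) (gl : List Int)
    (h : acc.map Prod.snd = gl) :
    ((acc.filter (fun p => decide (t - 60 < p.2))).map Prod.snd).length
      = (gl.filter (fun x => decide (t - 60 < x))).length := by
  subst h
  induction acc with
  | nil => rfl
  | cons p l ih => by_cases hp : t - 60 < p.2 <;> simp [hp, ih]

lemma pvFoldRel (u g : Int) (hu : 1 ≤ u) (hg : 1 ≤ g) :
    ∀ (l : List (List Int)) (T : Int) (sA : PySem.Dict Int (List Int) × List Int)
      (acc : List (Int × Int)),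
      l.Pairwise pvLe → (∀ r ∈ l, T ≤ pvT r) → pvInv T sA acc →
      pvLoopB u g l acc = ((l.foldl (pvStepA u g) sA).2.length : Int) := by
  intro l
  induction l with
  | nil =>
    intro T sA acc _ _ hinv
    simpa [pvLoopB] using congrArg (fun (xs : List Int) => (xs.length : Int)) hinv.1
  | cons r rest ih =>
    intro T sA acc hpw hT hinv
    rw [List.pairwise_cons] at hpw
    obtain ⟨hmap, hdict, hgs, hgb⟩ := hinv
    have hTt : T ≤ PySem.List.pyGetD r 1 0 := by
      have := hT r (List.mem_cons_self); simpa [pvT] using this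
    have hT' : ∀ r' ∈ rest, PySem.List.pyGetD r 1 0 ≤ pvT r' := by
      intro r' hr'
      rcases hpw.1 r' hr' with h | h
      · exact le_of_lt h
      · exact le_of_eq h.1
    have hus : (sA.1.getD (PySem.List.pyGetD r 0 0) []).Pairwise (· ≤ ·) := by
      have hsub : List.Sublist ((acc.filter (fun p => p.1 == PySem.List.pyGetD r 0 0)).map Prod.snd)
          (acc.map Prod.snd) := List.Sublist.map _ List.filter_sublist
      rw [hmap, hdict] at hsub
      exact hgs.sublist hsub
    have hub : ∀ x ∈ sA.1.getD (PySem.List.pyGetD r 0 0) [], x ≤ T := by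
      intro x hx
      have hsub : List.Sublist ((acc.filter (fun p => p.1 == PySem.List.pyGetD r 0 0)).map Prod.snd)
          (acc.map Prod.snd) := List.Sublist.map _ List.filter_sublist
      rw [hmap, hdict] at hsub
      exact hgb x (hsub.mem hx)
    have hmine := pvMine_eq acc (PySem.List.pyGetD r 0 0) (PySem.List.pyGetD r 1 0)
    rw [hdict] at hmine
    have hrecent := pvRecent_eq acc (PySem.List.pyGetD r 1 0) sA.2 hmap
    have hdecU := pvDecision (sA.1.getD (PySem.List.pyGetD r 0 0) []) u (PySem.List.pyGetD r 1 0) hu hus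
    have hdecG := pvDecision sA.2 g (PySem.List.pyGetD r 1 0) hg hgs
    rw [List.foldl_cons]
    by_cases hA : (((sA.1.getD (PySem.List.pyGetD r 0 0) []).length : Int) < u ∨
          60 ≤ PySem.List.pyGetD r 1 0 - PySem.List.pyGetD (sA.1.getD (PySem.List.pyGetD r 0 0) []) (-u) 0) ∧
         (((sA.2.length : Int) < g) ∨ 60 ≤ PySem.List.pyGetD r 1 0 - PySem.List.pyGetD sA.2 (-g) 0)
    · -- accepted
      have hB : ((acc.countP (fun p => p.1 == PySem.List.pyGetD r 0 0 &&
            decide (PySem.List.pyGetD r 1 0 - 60 < p.2)) : Int) < u) ∧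
          ((((acc.filter (fun p => decide (PySem.List.pyGetD r 1 0 - 60 < p.2))).map Prod.snd).length : Int) < g) := by
        rw [hmine, hrecent]
        exact ⟨hdecU.mp hA.1, hdecG.mp hA.2⟩
      have hstep : pvLoopB u g (r :: rest) acc =
          pvLoopB u g rest (acc ++ [(PySem.List.pyGetD r 0 0, PySem.List.pyGetD r 1 0)]) := by
        simp only [pvLoopB]
        rw [if_pos hB]
      rw [hstep, pvStepA_pos u g sA r hA]
      apply ih _ _ _ hpw.2 hT'
      refine ⟨?_, ?_, ?_, ?_⟩
      · simp [hmap]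
      · intro v
        rw [List.filter_append, List.map_append]
        by_cases hv : v = PySem.List.pyGetD r 0 0
        · subst hv
          rw [PySem.Dict.getD_insert, if_pos rfl, ← hdict]
          simp
        · rw [PySem.Dict.getD_insert, if_neg hv, ← hdict]
          have : (PySem.List.pyGetD r 0 0 == v) = false := by
            simp; intro h; exact hv h.symm
          simp [this]
      · rw [List.pairwise_append]
        exact ⟨hgs, List.pairwise_singleton _ _,
          fun x hx y hy => by simp at hy; subst hy; have := hgb x hx; omega⟩
      · intro x hx
        rcases List.mem_append.mp hx with hx | hx
        · have := hgb x hx; omega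
        · simp at hx; omega
    · -- rejected
      have hB : ¬ (((acc.countP (fun p => p.1 == PySem.List.pyGetD r 0 0 &&
            decide (PySem.List.pyGetD r 1 0 - 60 < p.2)) : Int) < u) ∧
          ((((acc.filter (fun p => decide (PySem.List.pyGetD r 1 0 - 60 < p.2))).map Prod.snd).length : Int) < g)) := by
        rw [hmine, hrecent]
        intro hcon
        exact hA ⟨hdecU.mpr hcon.1, hdecG.mpr hcon.2⟩
      have hstep : pvLoopB u g (r :: rest) acc = pvLoopB u g rest acc := by
        simp only [pvLoopB]
        rw [if_neg hB]
      rw [hstep, pvStepA_neg u g sA r hA]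
      apply ih _ _ _ hpw.2 hT'
      exact ⟨hmap, hdict, hgs, fun x hx => by have := hgb x hx; omega⟩

-- ===== VERDICT (by name: the statement is the Claim_ definition above) =====
theorem DDoSProtection_spec : Claim_equal_DDoSProtection := by
  unfold Claim_equal_DDoSProtection
  intro requests u g _ hpre
  unfold Spec_DDoSProtection DDoSProtection DDoSProtection_alt
  by_cases h0 : u = 0 ∨ g = 0
  · rw [if_pos h0, if_pos h0]
  · rw [if_neg h0, if_neg h0]
    have hug : 1 ≤ u ∧ 1 ≤ g ∨ requests = [] := by
      rcases hpre with h | h | h | ⟨h1, h2, _⟩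
      · exact absurd (Or.inl h) h0
      · exact absurd (Or.inr h) h0
      · exact Or.inr h
      · exact Or.inl ⟨h1, h2⟩
    cases hsor : PySem.List.sorted2 requests (fun x => PySem.List.pyGetD x 1 0)
        (fun x => PySem.List.pyGetD x 0 0) with
    | nil => rfl
    | cons r rest =>
      have hne : ¬ (1 ≤ u ∧ 1 ≤ g) → False := by
        intro hcon
        rcases hug with h | h
        · exact hcon h
        · subst h
          simp [PySem.List.sorted2] at hsor
      have hu : 1 ≤ u := by by_cases h : 1 ≤ u ∧ 1 ≤ g; exacts [h.1, absurd (hne h) (by simp)]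
      have hg : 1 ≤ g := by by_cases h : 1 ≤ u ∧ 1 ≤ g; exacts [h.2, absurd (hne h) (by simp)]
      have hpw := pvSorted2_pairwise requests
      rw [hsor] at hpw
      refine (pvFoldRel u g hu hg (r :: rest) (pvT r) (PySem.Dict.empty, []) [] hpw ?_ ?_).symm
      · intro r' hr'
        rcases List.mem_cons.mp hr' with rfl | hr'
        · exact le_refl _
        · rcases (List.pairwise_cons.mp hpw).1 r' hr' with h | h
          · exact le_of_lt h
          · exact le_of_eq h.1
      · refine ⟨rfl, fun v => ?_, List.Pairwise.nil, by simp⟩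
        rw [PySem.Dict.getD_empty]
        rfl

def DDoSProtection_raises : Claim_raises_DDoSProtection := by
  unfold Claim_raises_DDoSProtection
  constructor
  · intro requests u g _ hr hp
    rcases hr with ⟨hne, hu, hg, hneg, _⟩
    rcases hp with h | h | h | ⟨h1, h2, _⟩ <;> first | exact hu h | exact hg h | exact hne h | omega
  · exact ⟨by decide, by decide, by decide⟩
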